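-- pv_equiv track=rewrite | github.com/x0Sofiane/leet-speak | V2/fonctions.py | leetToHuman
-- ===== SOURCE A (Python) =====
-- def maxLetters(dico):
--     max = 0
--     for key in dico:
--         if len(dico[key]) > max:
--             max = len(dico[key])
--     return max
--
-- def returnDic(dic):
--     return {dic[key]: key for key in dic}
--
-- def leetToHuman(text: str, dic: dict) -> str:
--     max = maxLetters(dic)
--     invDic = returnDic(dic)
--     newText = ''
--
--     while len(text) > 0:
--         cond = True
--         for j in range(max, -1, - 1):
--             c = text[:j]
--             if invDic.get(c) != None:
--                 newText += invDic[c]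
--                 text = text[j:]
--                 cond = False
--                 break
--         if cond:
--             newText += text[0]
--             text = text[1:]
--     return newText
-- ===== SOURCE B (Python) =====
-- def leetToHuman(text: str, dic: dict) -> str:
--     inv = {v: k for k, v in dic.items()}
--     out = []
--     i = 0
--     n = len(text)
--     while i < n:
--         best = None
--         for leet, ch in inv.items():
--             L = len(leet)
--             if L > 0 and text.startswith(leet, i) and (best is None or L > len(best[0])):
--                 best = (leet, ch)
--         if best is not None:
--             out.append(best[1])
--             i += len(best[0])
--         else:
--             out.append(text[i])
--             i += 1
--     return ''.join(out)
-- ===== Notes on version B (the rewrite author's own statement) =====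
-- stated objective: alternative
-- what changed: A tries every candidate length from max down to 0 with a dict lookup per length (slicing and += concatenation on shrinking strings); B instead scans the inverted dict's items once per position, keeping the longest key that matches at the current index, and joins collected pieces at the end.
import Mathlib
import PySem

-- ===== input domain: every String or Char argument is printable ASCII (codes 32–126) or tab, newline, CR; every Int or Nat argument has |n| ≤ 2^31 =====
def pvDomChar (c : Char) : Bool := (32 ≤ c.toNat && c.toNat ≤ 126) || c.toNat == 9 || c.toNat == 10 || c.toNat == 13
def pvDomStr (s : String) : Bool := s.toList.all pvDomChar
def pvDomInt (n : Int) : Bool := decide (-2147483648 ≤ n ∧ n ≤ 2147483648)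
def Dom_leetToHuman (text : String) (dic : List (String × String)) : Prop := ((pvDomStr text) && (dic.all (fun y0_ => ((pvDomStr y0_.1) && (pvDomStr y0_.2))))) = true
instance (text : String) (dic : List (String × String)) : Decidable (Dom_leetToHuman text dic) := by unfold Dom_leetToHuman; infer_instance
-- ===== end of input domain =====

-- B replaces A's per-position countdown over candidate lengths (dict lookup per length, with
-- string slicing and += concatenation) by a single scan over the inverted dict's items picking
-- the longest key matching at the current index, accumulating pieces joined at the end
-- (objective: alternative, same asymptotic cost).

-- ===== PORT A =====
-- Python strings are ported as List Char; text[:j]/text[j:] with j ≥ 0 are List.take/List.drop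
-- (exact for nonnegative slice bounds); dict iteration 'for key in dico' with 'dico[key]' reads
-- the pair's key and value (dict keys are unique; Pre_ requires Nodup keys of the assoc list).

-- def maxLetters(dico): max = 0; for key in dico: if len(dico[key]) > max: max = len(dico[key])
def pvMaxLetters (dico : List (String × String)) : Nat :=
  dico.foldl (fun m kv => if kv.2.toList.length > m then kv.2.toList.length else m) 0

-- def returnDic(dic): return {dic[key]: key for key in dic}
def pvReturnDic (dic : List (String × String)) : PySem.Dict String String :=
  dic.foldl (fun acc kv => acc.insert kv.2 kv.1) PySem.Dict.empty

-- inner 'for j in range(max, -1, -1): c = text[:j]; if invDic.get(c) != None: … break'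
def pvFindJ (invDic : PySem.Dict String String) (s : List Char) : Nat → Option (String × Nat)
  | 0 =>
    match invDic.get? (String.ofList (s.take 0)) with
    | some v => some (v, 0)
    | none => none
  | j + 1 =>
    match invDic.get? (String.ofList (s.take (j + 1))) with
    | some v => some (v, j + 1)
    | none => pvFindJ invDic s j

-- outer 'while len(text) > 0' loop; fuel = initial length (each iteration of the Python consumes
-- at least one character whenever no dict value is the empty string, which Pre_ guarantees;
-- on an empty dict value the Python loops forever — those inputs are outside Pre_)
def pvLoopA (invDic : PySem.Dict String String) (maxl : Nat) : Nat → List Char → List Char → List Char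
  | _, [], acc => acc
  | 0, _ :: _, acc => acc
  | f + 1, c :: rest, acc =>
    match pvFindJ invDic (c :: rest) maxl with
    | some (v, j) => pvLoopA invDic maxl f ((c :: rest).drop j) (acc ++ v.toList)
    | none => pvLoopA invDic maxl f rest (acc ++ [c])

def leetToHuman (text : String) (dic : List (String × String)) : String :=
  let maxl := pvMaxLetters dic
  let invDic := pvReturnDic dic
  String.ofList (pvLoopA invDic maxl text.toList.length text.toList [])

-- ===== PORT B =====
-- 'L > 0 and text.startswith(leet, i) and (best is None or L > len(best[0]))'
def pvStep (s : List Char) (best : Option (String × String)) (kv : String × String) : Option (String × String) :=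
  if (decide (0 < kv.1.toList.length) && PySem.Chars.startswith s kv.1.toList &&
      (match best with
       | none => true
       | some b => decide (b.1.toList.length < kv.1.toList.length))) = true
  then some kv
  else best

-- 'best = None; for leet, ch in inv.items(): …'  (s is the suffix text[i:])
def pvBest (inv : List (String × String)) (s : List Char) : Option (String × String) :=
  inv.foldl (pvStep s) none

-- 'while i < n' over the suffix; fuel = initial length (each iteration advances i by ≥ 1)
def pvLoopB (inv : List (String × String)) : Nat → List Char → List (List Char) → List (List Char)
  | _, [], out => out
  | 0, _ :: _, out => out
  | f + 1, c :: rest, out =>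
    match pvBest inv (c :: rest) with
    | some kv => pvLoopB inv f ((c :: rest).drop kv.1.toList.length) (out ++ [kv.2.toList])
    | none => pvLoopB inv f rest (out ++ [[c]])

def leetToHuman_alt (text : String) (dic : List (String × String)) : String :=
  let inv := (dic.foldl (fun acc kv => acc.insert kv.2 kv.1) PySem.Dict.empty).items
  String.ofList ((pvLoopB inv text.toList.length text.toList []).flatten)

-- ===== PRECONDITION & SPEC =====
-- Pre_ excludes (a) assoc lists with duplicate keys, where the list↔dict correspondence is
-- ambiguous (A receives a deduplicated dict), and (b) for nonempty text, dicts containing an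
-- empty-string value, on which A's while loop never terminates (text[j:] with j = 0).
def Pre_leetToHuman (text : String) (dic : List (String × String)) : Prop :=
  (dic.map Prod.fst).Nodup ∧ (text ≠ "" → ∀ kv ∈ dic, kv.2 ≠ "")
instance (text : String) (dic : List (String × String)) : Decidable (Pre_leetToHuman text dic) := by
  unfold Pre_leetToHuman; infer_instance

def pvWitness_leetToHuman : String × (List (String × String)) :=
  ("h3y l33t", [("e", "3"), ("o", "0")])

def Spec_leetToHuman (text : String) (dic : List (String × String)) (out : String) : Prop := out = leetToHuman_alt text dic
instance (text : String) (dic : List (String × String)) (out : String) : Decidable (Spec_leetToHuman text dic out) := by unfold Spec_leetToHuman; infer_instance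

-- ===== CLAIM (what is proved, stated in full; the proofs are below) =====
def Claim_equal_leetToHuman : Prop := ∀ (text : String) (dic : List (String × String)), Dom_leetToHuman text dic → Pre_leetToHuman text dic → Spec_leetToHuman text dic (leetToHuman text dic)

-- ===== LEMMAS AND PROOFS =====

-- a pair kept by pvStep/pvBest matches the current suffix with a nonempty key
def pvGood (s : List Char) (kv : String × String) : Prop :=
  0 < kv.1.toList.length ∧ kv.1.toList <+: s

lemma pvMaxFold_le (l : List (String × String)) (m : Nat) :
    m ≤ l.foldl (fun m kv => if kv.2.toList.length > m then kv.2.toList.length else m) m := by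
  induction l generalizing m with
  | nil => simp
  | cons p t ih =>
    simp only [List.foldl_cons]
    refine le_trans ?_ (ih _)
    split <;> omega

lemma pvMaxFold_mem (l : List (String × String)) (m : Nat) (p : String × String) (hp : p ∈ l) :
    p.2.toList.length ≤ l.foldl (fun m kv => if kv.2.toList.length > m then kv.2.toList.length else m) m := by
  induction l generalizing m with
  | nil => simp at hp
  | cons q t ih =>
    simp only [List.foldl_cons]
    rcases List.mem_cons.mp hp with h | h
    · subst h
      refine le_trans ?_ (pvMaxFold_le t _)
      split <;> omega
    · exact ih _ h

lemma pvInvKeys_sub (l : List (String × String)) (d : PySem.Dict String String) (k : String)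
    (hk : k ∈ (l.foldl (fun acc kv => acc.insert kv.2 kv.1) d).keys) :
    k ∈ d.keys ∨ ∃ p ∈ l, k = p.2 := by
  induction l generalizing d with
  | nil => simp_all
  | cons q t ih =>
    simp only [List.foldl_cons] at hk
    rcases ih _ hk with h | ⟨p, hp, hkp⟩
    · rcases (PySem.Dict.mem_keys_insert _ _ _ _).mp h with h | h
      · exact Or.inr ⟨q, by simp, h⟩
      · exact Or.inl h
    · exact Or.inr ⟨p, by simp [hp], hkp⟩

lemma pvInv_nodup (dic : List (String × String)) : (pvReturnDic dic).keys.Nodup :=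
  PySem.Dict.nodup_keys_foldl_insert_key dic Prod.snd (fun _ kv => kv.1) _ PySem.Dict.nodup_keys_empty

lemma pvFindJ_some (invDic : PySem.Dict String String) (s : List Char) :
    ∀ (j : Nat) (v : String) (j' : Nat), pvFindJ invDic s j = some (v, j') →
      invDic.get? (String.ofList (s.take j')) = some v ∧ j' ≤ j ∧
        ∀ i, j' < i → i ≤ j → invDic.get? (String.ofList (s.take i)) = none := by
  intro j
  induction j with
  | zero =>
    intro v j' h
    unfold pvFindJ at h
    cases hg : invDic.get? (String.ofList (s.take 0)) with
    | some w => rw [hg] at h; simp at h; obtain ⟨hv, hj⟩ := h; subst hv; subst hj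
                exact ⟨hg, le_refl _, by omega⟩
    | none => rw [hg] at h; simp at h
  | succ j ih =>
    intro v j' h
    unfold pvFindJ at h
    cases hg : invDic.get? (String.ofList (s.take (j + 1))) with
    | some w =>
      rw [hg] at h; simp at h; obtain ⟨hv, hj⟩ := h; subst hv; subst hj
      exact ⟨hg, le_refl _, by omega⟩
    | none =>
      rw [hg] at h
      obtain ⟨h1, h2, h3⟩ := ih v j' h
      refine ⟨h1, by omega, ?_⟩
      intro i hi1 hi2
      rcases Nat.lt_or_ge i (j + 1) with hlt | hge
      · exact h3 i hi1 (by omega)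
      · have : i = j + 1 := by omega
        subst this; exact hg

lemma pvFindJ_none (invDic : PySem.Dict String String) (s : List Char) :
    ∀ (j : Nat), pvFindJ invDic s j = none →
      ∀ i ≤ j, invDic.get? (String.ofList (s.take i)) = none := by
  intro j
  induction j with
  | zero =>
    intro h i hi
    interval_cases i
    unfold pvFindJ at h
    cases hg : invDic.get? (String.ofList (s.take 0)) with
    | some w => rw [hg] at h; simp at h
    | none => rfl
  | succ j ih =>
    intro h i hi
    unfold pvFindJ at h
    cases hg : invDic.get? (String.ofList (s.take (j + 1))) with
    | some w => rw [hg] at h; simp at h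
    | none =>
      rw [hg] at h
      rcases Nat.lt_or_ge i (j + 1) with hlt | hge
      · exact ih h i (by omega)
      · have : i = j + 1 := by omega
        subst this; exact hg

lemma pvStep_cases (s : List Char) (b : Option (String × String)) (kv : String × String) :
    (pvStep s b kv = some kv ∧ pvGood s kv ∧ (∀ b0, b = some b0 → b0.1.toList.length < kv.1.toList.length)) ∨
    (pvStep s b kv = b ∧ (pvGood s kv → ∀ b0, b = some b0 → kv.1.toList.length ≤ b0.1.toList.length)) := by
  cases b with
  | none =>
    unfold pvStep
    simp only [Bool.and_true]
    split
    · rename_i hc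
      simp only [Bool.and_eq_true, decide_eq_true_eq] at hc
      exact Or.inl ⟨rfl, ⟨hc.1, (PySem.Chars.startswith_iff s kv.1.toList).mp hc.2⟩, by simp⟩
    · exact Or.inr ⟨rfl, by simp⟩
  | some b0 =>
    unfold pvStep
    simp only []
    split
    · rename_i hc
      simp only [Bool.and_eq_true, decide_eq_true_eq] at hc
      exact Or.inl ⟨rfl, ⟨hc.1.1, (PySem.Chars.startswith_iff s kv.1.toList).mp hc.1.2⟩,
        by intro x hx; cases hx; exact hc.2⟩
    · rename_i hc
      refine Or.inr ⟨rfl, ?_⟩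
      intro hg x hx; cases hx
      by_contra hlt
      exact hc (by
        simp only [Bool.and_eq_true, decide_eq_true_eq]
        exact ⟨⟨hg.1, (PySem.Chars.startswith_iff s kv.1.toList).mpr hg.2⟩, by omega⟩)

lemma pvBest_fold (s : List Char) (l : List (String × String)) :
    ∀ (b : Option (String × String)), (∀ kv, b = some kv → pvGood s kv) →
      (∀ kv, l.foldl (pvStep s) b = some kv → pvGood s kv ∧ (b = some kv ∨ kv ∈ l)) ∧
      (∀ b0, b = some b0 → ∃ kv, l.foldl (pvStep s) b = some kv ∧
        b0.1.toList.length ≤ kv.1.toList.length) ∧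
      (∀ kv' ∈ l, pvGood s kv' → ∃ kv, l.foldl (pvStep s) b = some kv ∧
        kv'.1.toList.length ≤ kv.1.toList.length) := by
  induction l with
  | nil =>
    intro b hb
    refine ⟨fun kv h => ⟨hb kv h, Or.inl h⟩, fun b0 hb0 => ⟨b0, by simp [hb0], le_refl _⟩, by simp⟩
  | cons p t ih =>
    intro b hb
    simp only [List.foldl_cons]
    rcases pvStep_cases s b p with ⟨he, hg, hlt⟩ | ⟨he, hle⟩
    · -- step kept p
      have hb' : ∀ kv, some p = some kv → pvGood s kv := by
        intro kv h; cases h; exact hg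
      obtain ⟨ih1, ih2, ih3⟩ := ih (some p) hb'
      rw [he]
      refine ⟨?_, ?_, ?_⟩
      · intro kv h
        obtain ⟨hgkv, hcase⟩ := ih1 kv h
        rcases hcase with h' | h'
        · cases h'; exact ⟨hgkv, Or.inr (by simp)⟩
        · exact ⟨hgkv, Or.inr (by simp [h'])⟩
      · intro b0 hb0
        obtain ⟨kv, hkv, hlen⟩ := ih2 p rfl
        exact ⟨kv, hkv, le_trans (le_of_lt (hlt b0 hb0)) hlen⟩
      · intro kv' hkv' hgkv'
        rcases List.mem_cons.mp hkv' with h' | h'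
        · subst h'
          obtain ⟨kv, hkv, hlen⟩ := ih2 kv' rfl
          exact ⟨kv, hkv, hlen⟩
        · exact ih3 kv' h' hgkv'
    · -- step kept b
      obtain ⟨ih1, ih2, ih3⟩ := ih b hb
      rw [he]
      refine ⟨?_, ?_, ?_⟩
      · intro kv h
        obtain ⟨hgkv, hcase⟩ := ih1 kv h
        rcases hcase with h' | h'
        · exact ⟨hgkv, Or.inl h'⟩
        · exact ⟨hgkv, Or.inr (by simp [h'])⟩
      · exact ih2
      · intro kv' hkv' hgkv'
        rcases List.mem_cons.mp hkv' with h' | h'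
        · subst h'
          cases b with
          | none =>
            -- b = none and step kept b: contradicts goodness of kv'
            exfalso
            simp [pvStep, (PySem.Chars.startswith_iff s kv'.1.toList).mpr hgkv'.2] at he
            have := hgkv'.1
            rw [he] at this
            simp at this
          | some b0 =>
            obtain ⟨kv, hkv, hlen⟩ := ih2 b0 rfl
            exact ⟨kv, hkv, le_trans (hle hgkv' b0 rfl) hlen⟩
        · exact ih3 kv' h' hgkv'

-- the one-step bridge: on a nonempty suffix, A's length countdown and B's item scan
-- select the same output character and leave the same remaining suffix
lemma pvStep_eq (invDic : PySem.Dict String String) (maxl : Nat) (s : List Char)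
    (hnd : invDic.keys.Nodup)
    (hlen : ∀ kv ∈ invDic.items, kv.1.toList.length ≤ maxl)
    (hne : ∀ kv ∈ invDic.items, kv.1 ≠ "") :
    (pvFindJ invDic s maxl = none ∧ pvBest invDic.items s = none) ∨
    (∃ v j kv, pvFindJ invDic s maxl = some (v, j) ∧ pvBest invDic.items s = some kv ∧
      v = kv.2 ∧ s.drop j = s.drop kv.1.toList.length) := by
  obtain ⟨bf1, _, bf3⟩ := pvBest_fold s invDic.items none (by simp)
  cases hB : pvBest invDic.items s with
  | none =>
    left
    refine ⟨?_, rfl⟩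
    cases hA : pvFindJ invDic s maxl with
    | none => rfl
    | some vj =>
      exfalso
      obtain ⟨v, j⟩ := vj
      obtain ⟨hget, hj, _⟩ := pvFindJ_some invDic s maxl v j hA
      have hmemc := PySem.Dict.mem_items_of_get?_eq_some _ hget
      have hcne : s.take j ≠ [] := by
        intro hnil
        exact hne _ hmemc (by simp [hnil])
      have hgood : pvGood s (String.ofList (s.take j), v) := by
        refine ⟨?_, by simpa using List.take_prefix j s⟩
        have h0 : 0 < (s.take j).length := List.length_pos_iff.mpr hcne
        simpa using h0
      obtain ⟨kv, hkv, _⟩ := bf3 _ hmemc hgood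
      rw [pvBest] at hB
      rw [hB] at hkv
      simp at hkv
  | some kv =>
    obtain ⟨hgood, hmem⟩ := bf1 kv (by rw [pvBest] at hB; exact hB)
    have hmem : kv ∈ invDic.items := by
      rcases hmem with h | h
      · exact absurd h (by simp)
      · exact h
    have hkpre : kv.1.toList <+: s := hgood.2
    have hkpos : 0 < kv.1.toList.length := hgood.1
    have hkle : kv.1.toList.length ≤ maxl := hlen kv hmem
    have hgetk : invDic.get? kv.1 = some kv.2 := PySem.Dict.get?_of_mem_items _ hmem hnd
    have htakek : s.take kv.1.toList.length = kv.1.toList := (List.prefix_iff_eq_take.mp hkpre).symm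
    have hgetk' : invDic.get? (String.ofList (s.take kv.1.toList.length)) = some kv.2 := by
      rw [htakek, String.ofList_toList]; exact hgetk
    cases hA : pvFindJ invDic s maxl with
    | none =>
      exfalso
      have h := pvFindJ_none invDic s maxl hA kv.1.toList.length hkle
      rw [h] at hgetk'
      simp at hgetk'
    | some vj =>
      obtain ⟨v, j⟩ := vj
      right
      obtain ⟨hget, hj, hmax⟩ := pvFindJ_some invDic s maxl v j hA
      have hklej : kv.1.toList.length ≤ j := by
        by_contra hlt
        have h := hmax kv.1.toList.length (by omega) hkle
        rw [h] at hgetk'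
        simp at hgetk'
      have hmemc := PySem.Dict.mem_items_of_get?_eq_some _ hget
      have hcne : s.take j ≠ [] := fun hnil => hne _ hmemc (by simp [hnil])
      have hgoodc : pvGood s (String.ofList (s.take j), v) := by
        refine ⟨?_, by simpa using List.take_prefix j s⟩
        have h0 : 0 < (s.take j).length := List.length_pos_iff.mpr hcne
        simpa using h0
      obtain ⟨kv', hkv', hlenle⟩ := bf3 _ hmemc hgoodc
      rw [pvBest] at hB
      rw [hB] at hkv'
      cases hkv'
      have hclen : (s.take j).length ≤ kv.1.toList.length := by simpa using hlenle
      have hveq : v = kv.2 ∧ s.drop j = s.drop kv.1.toList.length := by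
        rcases Nat.lt_or_ge j (s.length + 1) with hle | hgt
        · have hjlen : (s.take j).length = j := by simp [Nat.lt_succ_iff.mp hle]
          have hj_eq : j = kv.1.toList.length := by omega
          have hc_eq : String.ofList (s.take j) = kv.1 := by
            rw [hj_eq, htakek, String.ofList_toList]
          rw [hc_eq] at hget
          rw [hget] at hgetk
          exact ⟨Option.some.inj hgetk, by rw [hj_eq]⟩
        · have hcs : s.take j = s := List.take_of_length_le (by omega)
          have hslen : s.length ≤ kv.1.toList.length := by
            have h := hclen; rw [hcs] at h; exact h
          have hks : kv.1.toList = s :=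
            List.IsPrefix.eq_of_length hkpre (le_antisymm (List.IsPrefix.length_le hkpre) hslen)
          have hc_eq : String.ofList (s.take j) = kv.1 := by
            rw [hcs, ← hks, String.ofList_toList]
          rw [hc_eq] at hget
          rw [hget] at hgetk
          refine ⟨Option.some.inj hgetk, ?_⟩
          rw [List.drop_eq_nil_of_le (by omega), hks, List.drop_eq_nil_of_le (le_refl _)]
      exact ⟨v, j, kv, rfl, rfl, hveq.1, hveq.2⟩

lemma pvLoops_eq (invDic : PySem.Dict String String) (maxl : Nat)
    (hnd : invDic.keys.Nodup)
    (hlen : ∀ kv ∈ invDic.items, kv.1.toList.length ≤ maxl)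
    (hne : ∀ kv ∈ invDic.items, kv.1 ≠ "") :
    ∀ (f : Nat) (s : List Char) (accA : List Char) (accB : List (List Char)),
      accA = accB.flatten →
      pvLoopA invDic maxl f s accA = (pvLoopB invDic.items f s accB).flatten := by
  intro f
  induction f with
  | zero =>
    intro s accA accB hacc
    cases s <;> simp [pvLoopA, pvLoopB, hacc]
  | succ f ih =>
    intro s accA accB hacc
    cases s with
    | nil => simp [pvLoopA, pvLoopB, hacc]
    | cons c rest =>
      rcases pvStep_eq invDic maxl (c :: rest) hnd hlen hne with
        ⟨hA, hB⟩ | ⟨v, j, kv, hA, hB, hv, hdrop⟩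
      · simp only [pvLoopA, pvLoopB, hA, hB]
        exact ih rest _ _ (by simp [hacc])
      · simp only [pvLoopA, pvLoopB, hA, hB]
        rw [hdrop, hv]
        exact ih _ _ _ (by simp [hacc])

-- ===== VERDICT (by name: the statement is the Claim_ definition above) =====
theorem leetToHuman_spec : Claim_equal_leetToHuman := by
  intro text dic _hdom hpre
  unfold Spec_leetToHuman leetToHuman leetToHuman_alt
  show String.ofList _ = String.ofList _
  apply congrArg String.ofList
  by_cases h : text.toList = []
  · rw [h]
    cases hl : text.toList.length <;> simp [pvLoopA, pvLoopB]
  · have htne : text ≠ "" := fun he => h (by simp [he])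
    have hkeys : ∀ k ∈ (pvReturnDic dic).keys, ∃ p ∈ dic, k = p.2 := by
      intro k hk
      rcases pvInvKeys_sub dic PySem.Dict.empty k hk with hmem | hex
      · simp at hmem
      · exact hex
    have hne : ∀ kv ∈ (pvReturnDic dic).items, kv.1 ≠ "" := by
      intro kv hkv
      obtain ⟨p, hp, hkp⟩ := hkeys kv.1 (PySem.Dict.mem_keys_of_mem_items _ hkv)
      rw [hkp]
      exact hpre.2 htne p hp
    have hlen : ∀ kv ∈ (pvReturnDic dic).items, kv.1.toList.length ≤ pvMaxLetters dic := by
      intro kv hkv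
      obtain ⟨p, hp, hkp⟩ := hkeys kv.1 (PySem.Dict.mem_keys_of_mem_items _ hkv)
      rw [hkp]
      exact pvMaxFold_mem dic 0 p hp
    exact pvLoops_eq (pvReturnDic dic) (pvMaxLetters dic) (pvInv_nodup dic) hlen hne
      text.toList.length text.toList [] [] rfl
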